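-- pv_equiv track=rewrite | github.com/dssdave/themoneygps | convert_vtt_to_txt.py | get_base_filename_without_known_extensions
-- ===== SOURCE A (Python) =====
-- def get_base_filename_without_known_extensions(filename):
--     """
--     Removes known extensions (.vtt) and common language codes (.en, .es, etc.)
--     from the end of a filename, preserving dots in the main title.
--     """
--     base_name = filename
--     known_extensions = ['.vtt']
--     # Add more language codes here if needed
--     known_lang_codes = ['.en', '.es', '.fr', '.de', '.it', '.pt', '.ru', '.ja', '.ko', '.zh']
--
--     # Remove known extensions first
--     for ext in known_extensions:
--         if base_name.lower().endswith(ext):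
--             base_name = base_name[:-len(ext)]
--             break # Only remove one extension typically
--
--     # Then remove known language codes if they appear at the end
--     for lang_code in known_lang_codes:
--          if base_name.lower().endswith(lang_code):
--              base_name = base_name[:-len(lang_code)]
--              break # Only remove one language code typically
--
--     return base_name
-- ===== SOURCE B (Python) =====
-- _LANG_TOKENS = {'en', 'es', 'fr', 'de', 'it', 'pt', 'ru', 'ja', 'ko', 'zh'}
--
--
-- def get_base_filename_without_known_extensions(filename):
--     # Tokenize on dots, pop at most one extension token and then at most one
--     # language token off the end, and rejoin.  A token only counts when more
--     # than one part remains, i.e. when the token really follows a dot.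
--     parts = filename.split('.')
--     if len(parts) > 1 and parts[-1].lower() == 'vtt':
--         parts.pop()
--     if len(parts) > 1 and parts[-1].lower() in _LANG_TOKENS:
--         parts.pop()
--     return '.'.join(parts)
-- ===== Notes on version B (the rewrite author's own statement) =====
-- stated objective: idiomatic
-- what changed: Instead of A's two loops that scan candidate dotted suffixes with case-insensitive endswith and slice the string, B tokenizes the filename once on dots with split, pops at most one trailing extension token and then at most one language token off the token list, and rejoins the tokens.
import Mathlib
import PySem

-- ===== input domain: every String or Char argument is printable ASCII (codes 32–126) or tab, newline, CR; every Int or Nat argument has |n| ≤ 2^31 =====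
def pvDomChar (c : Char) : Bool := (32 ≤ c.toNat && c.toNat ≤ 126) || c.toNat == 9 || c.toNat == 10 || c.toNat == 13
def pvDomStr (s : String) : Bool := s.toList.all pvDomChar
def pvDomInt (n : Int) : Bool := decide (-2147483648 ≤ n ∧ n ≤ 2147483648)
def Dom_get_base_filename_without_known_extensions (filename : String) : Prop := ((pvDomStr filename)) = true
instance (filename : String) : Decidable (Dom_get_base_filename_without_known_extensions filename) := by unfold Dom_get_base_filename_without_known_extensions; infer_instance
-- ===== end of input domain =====

-- B replaces A's two candidate-scanning endswith loops by tokenizing the filename on dots,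
-- popping at most one 'vtt' token and then one language token, and rejoining; objective: idiomatic.

-- ===== PORT A =====
-- the 'for ext in …: if …endswith(ext): …; break' loop, one candidate per step
def pvStripA (cands : List (List Char)) (base : List Char) : List Char :=
  match cands with
  | [] => base
  | c :: rest =>
      if PySem.Chars.endswith (PySem.Chars.lower base) c then
        PySem.List.slice base none (some (-(c.length : Int)))
      else pvStripA rest base

def pvKnownExtensionsA : List (List Char) := [['.', 'v', 't', 't']]

def pvKnownLangCodesA : List (List Char) :=
  [['.', 'e', 'n'], ['.', 'e', 's'], ['.', 'f', 'r'], ['.', 'd', 'e'], ['.', 'i', 't'],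
   ['.', 'p', 't'], ['.', 'r', 'u'], ['.', 'j', 'a'], ['.', 'k', 'o'], ['.', 'z', 'h']]

def get_base_filename_without_known_extensions (filename : String) : String :=
  let base1 := pvStripA pvKnownExtensionsA filename.toList
  let base2 := pvStripA pvKnownLangCodesA base1
  String.ofList base2

-- ===== PORT B =====
def pvLangTokensB : PySem.Set (List Char) :=
  PySem.Set.ofList
    [['e', 'n'], ['e', 's'], ['f', 'r'], ['d', 'e'], ['i', 't'],
     ['p', 't'], ['r', 'u'], ['j', 'a'], ['k', 'o'], ['z', 'h']]

-- parts[-1] is PySem.List.pyGet? parts (-1); the 'len(parts) > 1' guard makes it some _,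
-- so .getD [] is exact; parts.pop() removes the last element, i.e. dropLast.
def get_base_filename_without_known_extensions_alt (filename : String) : String :=
  let parts := PySem.Chars.splitOn filename.toList ['.']
  let p1 := if 1 < parts.length ∧
               PySem.Chars.lower ((PySem.List.pyGet? parts (-1)).getD []) = ['v', 't', 't']
            then parts.dropLast else parts
  let p2 := if 1 < p1.length ∧
               PySem.Chars.lower ((PySem.List.pyGet? p1 (-1)).getD []) ∈ pvLangTokensB
            then p1.dropLast else p1
  String.ofList (PySem.Chars.join ['.'] p2)

-- ===== PRECONDITION & SPEC =====
def Spec_get_base_filename_without_known_extensions (filename : String) (out : String) : Prop := out = get_base_filename_without_known_extensions_alt filename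
instance (filename : String) (out : String) : Decidable (Spec_get_base_filename_without_known_extensions filename out) := by unfold Spec_get_base_filename_without_known_extensions; infer_instance

-- ===== CLAIM =====
def Claim_equal_get_base_filename_without_known_extensions : Prop := ∀ (filename : String), Dom_get_base_filename_without_known_extensions filename → Spec_get_base_filename_without_known_extensions filename (get_base_filename_without_known_extensions filename)

-- ===== LEMMAS AND PROOFS =====

-- reference form of Python's split on a single dot
def pvSplit : List Char → List (List Char)
  | [] => [[]]
  | c :: cs =>
      if c = '.' then [] :: pvSplit cs
      else
        match pvSplit cs with
        | [] => [[c]]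
        | h :: t => (c :: h) :: t

lemma pvSplit_ne_nil (cs : List Char) : pvSplit cs ≠ [] := by
  cases cs with
  | nil => simp [pvSplit]
  | cons c cs =>
    simp only [pvSplit]
    split_ifs
    · simp
    · cases pvSplit cs <;> simp

def pvConsPre (p : List Char) : List (List Char) → List (List Char)
  | [] => [p]
  | h :: t => (p ++ h) :: t

lemma pvGo_eq (fuel : Nat) (cs cur : List Char) (acc : List (List Char))
    (h : cs.length ≤ fuel) :
    PySem.Chars.splitOn.go ['.'] fuel cs cur acc =
      acc.reverse ++ pvConsPre cur.reverse (pvSplit cs) := by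
  induction fuel generalizing cs cur acc with
  | zero =>
    interval_cases h2 : cs.length
    have : cs = [] := List.length_eq_zero_iff.mp h2
    subst this
    simp [PySem.Chars.splitOn.go, pvSplit, pvConsPre]
  | succ fuel ih =>
    cases cs with
    | nil => simp [PySem.Chars.splitOn.go, pvSplit, pvConsPre]
    | cons c rest =>
      rw [PySem.Chars.splitOn.go]
      by_cases hc : c = '.'
      · subst hc
        rw [if_pos (by simp [List.isPrefixOf])]
        rw [ih _ _ _ (by simpa using Nat.le_of_succ_le_succ h)]
        simp [pvSplit]
        cases hps : pvSplit rest with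
        | nil => exact absurd hps (pvSplit_ne_nil rest)
        | cons h t => simp [pvConsPre]
      · rw [if_neg (by simp [List.isPrefixOf]; exact fun h => hc h.symm)]
        rw [ih _ _ _ (by simpa using Nat.le_of_succ_le_succ h)]
        simp only [pvSplit, if_neg hc]
        cases hps : pvSplit rest with
        | nil => exact absurd hps (pvSplit_ne_nil rest)
        | cons h t => simp [pvConsPre]

lemma pvSplitOn_eq (cs : List Char) :
    PySem.Chars.splitOn cs ['.'] = pvSplit cs := by
  rw [PySem.Chars.splitOn, pvGo_eq _ _ _ _ (by omega)]
  cases hps : pvSplit cs with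
  | nil => exact absurd hps (pvSplit_ne_nil cs)
  | cons h t => simp [pvConsPre]

-- join is a left inverse of split
lemma pvJoin_split (cs : List Char) :
    PySem.Chars.join ['.'] (pvSplit cs) = cs := by
  induction cs with
  | nil => simp [pvSplit, PySem.Chars.join_singleton]
  | cons c cs ih =>
    by_cases hc : c = '.'
    · subst hc
      simp only [pvSplit, reduceIte]
      cases hps : pvSplit cs with
      | nil => exact absurd hps (pvSplit_ne_nil cs)
      | cons h t =>
        rw [PySem.Chars.join_cons_cons]
        rw [hps] at ih
        simp [ih]
    · simp only [pvSplit, if_neg hc]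
      cases hps : pvSplit cs with
      | nil => exact absurd hps (pvSplit_ne_nil cs)
      | cons h t =>
        rw [hps] at ih
        cases t with
        | nil =>
          simp_all [PySem.Chars.join_singleton]
        | cons q t =>
          rw [PySem.Chars.join_cons_cons] at ih ⊢
          simp [ih.symm]

lemma pvSplit_append_dot (xs ys : List Char) :
    pvSplit (xs ++ '.' :: ys) = pvSplit xs ++ pvSplit ys := by
  induction xs with
  | nil =>
    simp [pvSplit]
  | cons c xs ih =>
    by_cases hc : c = '.'
    · subst hc; simp [pvSplit, ih]
    · simp only [List.cons_append, pvSplit, if_neg hc, ih]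
      cases hps : pvSplit xs with
      | nil => exact absurd hps (pvSplit_ne_nil xs)
      | cons h t => simp

lemma pvSplit_no_dot (zs : List Char) (h : '.' ∉ zs) : pvSplit zs = [zs] := by
  induction zs with
  | nil => simp [pvSplit]
  | cons c cs ih =>
    have hc : c ≠ '.' := fun he => h (by simp [he])
    simp only [pvSplit, if_neg hc, ih (fun hm => h (by simp [hm]))]

lemma pvLowerChar_dot_iff (c : Char) : PySem.Chars.lowerChar c = '.' ↔ c = '.' := by
  unfold PySem.Chars.lowerChar PySem.Chars.isupper
  split_ifs with h
  · simp only [Bool.and_eq_true, decide_eq_true_eq] at h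
    have h1 : ('A' : Char).toNat ≤ c.toNat := UInt32.le_iff_toNat_le.mp (Char.le_def.mp h.1)
    have h2 : c.toNat ≤ ('Z' : Char).toNat := UInt32.le_iff_toNat_le.mp (Char.le_def.mp h.2)
    have hA : ('A' : Char).toNat = 65 := by decide
    have hZ : ('Z' : Char).toNat = 90 := by decide
    have hDot : ('.' : Char).toNat = 46 := by decide
    constructor
    · intro he
      exfalso
      have hv : (c.toNat + 32).isValidChar := Or.inl (by omega)
      have ht : (Char.ofNat (c.toNat + 32)).toNat = c.toNat + 32 := by
        rw [Char.toNat_ofNat, if_pos hv]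
      rw [he] at ht
      omega
    · intro he
      exfalso
      subst he
      omega
  · exact Iff.rfl

lemma pvLower_dot_cons (t : List Char) (u : List Char)
    (h : PySem.Chars.lower t = '.' :: u) :
    ∃ t', t = '.' :: t' ∧ PySem.Chars.lower t' = u := by
  cases t with
  | nil => simp [PySem.Chars.lower] at h
  | cons c t' =>
    simp only [PySem.Chars.lower, List.map_cons, List.cons_eq_cons] at h
    exact ⟨t', by rw [(pvLowerChar_dot_iff c).mp h.1], h.2⟩

lemma pvLower_no_dot (t : List Char) (h : '.' ∉ PySem.Chars.lower t) : '.' ∉ t := by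
  intro hm
  exact h (by
    simp only [PySem.Chars.lower, List.mem_map]
    exact ⟨'.', hm, by decide⟩)

lemma pvLower_length (t : List Char) : (PySem.Chars.lower t).length = t.length := by
  simp [PySem.Chars.lower]

-- 'lower(b).endswith(c)' is 'lower of the last |c| chars equals c'
lemma pv_endswith_lower (b c : List Char) :
    PySem.Chars.endswith (PySem.Chars.lower b) c = true ↔
      PySem.Chars.lower (b.drop (b.length - c.length)) = c := by
  rw [PySem.Chars.endswith_iff, List.suffix_iff_eq_drop]
  unfold PySem.Chars.lower
  rw [List.length_map, ← List.map_drop]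
  exact eq_comm

-- A's candidate loop over same-length candidates is one membership test on the tail
lemma pvStripA_uniform (m : Nat) (hm : 0 < m) (cands : List (List Char))
    (hlen : ∀ c ∈ cands, c.length = m) (b : List Char) :
    pvStripA cands b =
      if PySem.Chars.lower (b.drop (b.length - m)) ∈ cands
      then b.take (b.length - m) else b := by
  induction cands with
  | nil => simp [pvStripA]
  | cons c rest ih =>
    have hcm : c.length = m := hlen c (by simp)
    by_cases h : PySem.Chars.endswith (PySem.Chars.lower b) c = true
    · have hmem : PySem.Chars.lower (b.drop (b.length - m)) = c := by
        have := (pv_endswith_lower b c).mp h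
        rwa [hcm] at this
      simp only [pvStripA, if_pos h, hcm]
      rw [show (-(m : Int)) = -((m : Nat) : Int) by norm_num,
          PySem.List.slice_to_neg_natCast b m hm, if_pos (by simp [hmem])]
    · have hne : PySem.Chars.lower (b.drop (b.length - m)) ≠ c := by
        intro he
        exact h ((pv_endswith_lower b c).mpr (by rwa [hcm]))
      simp only [pvStripA, if_neg h]
      rw [ih (fun c hc => hlen c (by simp [hc]))]
      simp [List.mem_cons, hne]

lemma pvLastTok_append (xs : List (List Char)) (t : List Char) :
    (PySem.List.pyGet? (xs ++ [t]) (-1)).getD [] = t := by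
  have hlen : (xs ++ [t]).length = xs.length + 1 := by simp
  simp only [PySem.List.pyGet?, PySem.List.pyIdx?, hlen]
  rw [if_neg (by omega), if_pos (by push_cast; omega)]
  simp

lemma pvJoin_append_singleton (init : List (List Char)) (h : init ≠ []) (t : List Char) :
    PySem.Chars.join ['.'] (init ++ [t]) = PySem.Chars.join ['.'] init ++ '.' :: t := by
  induction init with
  | nil => exact absurd rfl h
  | cons a init ih =>
    cases init with
    | nil => simp [PySem.Chars.join_cons_cons, PySem.Chars.join_singleton]
    | cons b init' =>
      have ih' := ih (by simp)
      rw [List.cons_append] at ih'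
      rw [List.cons_append, List.cons_append, PySem.Chars.join_cons_cons, ih',
          PySem.Chars.join_cons_cons]
      simp

-- one strip stage, stated on the token list
lemma pvStage_eq (k : Nat) (hk : 0 < k) (toks : List (List Char))
    (htok : ∀ u ∈ toks, u.length = k ∧ '.' ∉ u) (cs : List Char) :
    pvSplit (pvStripA (toks.map (List.cons '.')) cs) =
      (if 1 < (pvSplit cs).length ∧
          PySem.Chars.lower ((PySem.List.pyGet? (pvSplit cs) (-1)).getD []) ∈ toks
       then (pvSplit cs).dropLast else (pvSplit cs)) := by
  have hm : ∀ c ∈ toks.map (List.cons '.'), c.length = k + 1 := by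
    intro c hc
    rcases List.mem_map.mp hc with ⟨u, hu, rfl⟩
    simp [(htok u hu).1]
  rw [pvStripA_uniform (k + 1) (by omega) _ hm cs]
  by_cases hcond : PySem.Chars.lower (cs.drop (cs.length - (k + 1))) ∈ toks.map (List.cons '.')
  · rw [if_pos hcond]
    rcases List.mem_map.mp hcond with ⟨u, hu, hequ⟩
    have hlenu := (htok u hu).1
    have hdotu := (htok u hu).2
    have hlcs : k + 1 ≤ cs.length := by
      have hl := congrArg List.length hequ
      rw [pvLower_length] at hl
      simp only [List.length_drop, List.length_cons, hlenu] at hl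
      omega
    obtain ⟨t', hdrop, hlowt'⟩ := pvLower_dot_cons _ u hequ.symm
    have hdott' : '.' ∉ t' := pvLower_no_dot t' (by rw [hlowt']; exact hdotu)
    have hsplit : pvSplit cs = pvSplit (cs.take (cs.length - (k + 1))) ++ [t'] := by
      conv_lhs => rw [← List.take_append_drop (cs.length - (k + 1)) cs, hdrop]
      rw [pvSplit_append_dot, pvSplit_no_dot t' hdott']
    rw [hsplit]
    have hlen2 : 1 < (pvSplit (cs.take (cs.length - (k + 1))) ++ [t']).length := by
      cases hx : pvSplit (cs.take (cs.length - (k + 1))) with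
      | nil => exact absurd hx (pvSplit_ne_nil _)
      | cons a l => simp
    rw [if_pos ⟨hlen2, by rw [pvLastTok_append, hlowt']; exact hu⟩, List.dropLast_concat]
  · rw [if_neg hcond, if_neg ?_]
    rintro ⟨hlen2, hmem⟩
    apply hcond
    obtain ⟨init, last, hparts⟩ : ∃ init last, pvSplit cs = init ++ [last] :=
      ⟨(pvSplit cs).dropLast, (pvSplit cs).getLast (pvSplit_ne_nil cs),
        (List.dropLast_append_getLast (pvSplit_ne_nil cs)).symm⟩
    have hinit : init ≠ [] := by
      intro h
      rw [hparts, h] at hlen2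
      simp at hlen2
    rw [hparts, pvLastTok_append] at hmem
    have hlenlast : last.length = k := by
      have := (htok _ hmem).1
      rwa [pvLower_length] at this
    have hcs2 : cs = PySem.Chars.join ['.'] init ++ '.' :: last := by
      conv_lhs => rw [← pvJoin_split cs, hparts]
      rw [pvJoin_append_singleton init hinit]
    have hdl : cs.drop (cs.length - (k + 1)) = '.' :: last := by
      rw [hcs2, List.length_append]
      have hlast1 : ('.' :: last).length = k + 1 := by simp [hlenlast]
      rw [hlast1, Nat.add_sub_cancel, List.drop_left]
    rw [hdl]
    refine List.mem_map.mpr ⟨PySem.Chars.lower last, hmem, ?_⟩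
    show '.' :: PySem.Chars.lower last = PySem.Chars.lower ('.' :: last)
    simp only [PySem.Chars.lower, List.map_cons]
    rw [show PySem.Chars.lowerChar '.' = '.' from by decide]

def pvLangToksList : List (List Char) :=
  [['e', 'n'], ['e', 's'], ['f', 'r'], ['d', 'e'], ['i', 't'],
   ['p', 't'], ['r', 'u'], ['j', 'a'], ['k', 'o'], ['z', 'h']]

-- ===== VERDICT =====
theorem get_base_filename_without_known_extensions_spec : Claim_equal_get_base_filename_without_known_extensions := by
  intro filename _
  show _ = _
  rw [get_base_filename_without_known_extensions, get_base_filename_without_known_extensions_alt]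
  simp only [pvSplitOn_eq]
  have h1 := pvStage_eq 3 (by omega) [['v', 't', 't']] (by decide) filename.toList
  have h2 := pvStage_eq 2 (by omega) pvLangToksList (by decide) (pvStripA pvKnownExtensionsA filename.toList)
  have he1 : ([['v', 't', 't']] : List (List Char)).map (List.cons '.') = pvKnownExtensionsA := by decide
  have he2 : pvLangToksList.map (List.cons '.') = pvKnownLangCodesA := by decide
  rw [he1] at h1
  rw [he2] at h2
  have hc1 : ∀ (x : List Char), (x ∈ ([['v', 't', 't']] : List (List Char))) ↔ x = ['v', 't', 't'] := by
    intro x; simp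
  have hc2 : ∀ (x : List Char), x ∈ pvLangTokensB ↔ x ∈ pvLangToksList := by
    intro x
    exact PySem.Set.mem_ofList _ x
  rw [if_congr (iff_of_eq (congrArg _ rfl)) rfl rfl]
  have hp1 : (if 1 < (pvSplit filename.toList).length ∧
        PySem.Chars.lower ((PySem.List.pyGet? (pvSplit filename.toList) (-1)).getD []) = ['v', 't', 't']
      then (pvSplit filename.toList).dropLast else pvSplit filename.toList)
      = pvSplit (pvStripA pvKnownExtensionsA filename.toList) := by
    rw [h1, if_congr (and_congr_right fun _ => (hc1 _).symm) rfl rfl]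
  rw [hp1]
  have hp2 : (if 1 < (pvSplit (pvStripA pvKnownExtensionsA filename.toList)).length ∧
        PySem.Chars.lower ((PySem.List.pyGet? (pvSplit (pvStripA pvKnownExtensionsA filename.toList)) (-1)).getD []) ∈ pvLangTokensB
      then (pvSplit (pvStripA pvKnownExtensionsA filename.toList)).dropLast
      else pvSplit (pvStripA pvKnownExtensionsA filename.toList))
      = pvSplit (pvStripA pvKnownLangCodesA (pvStripA pvKnownExtensionsA filename.toList)) := by
    rw [h2, if_congr (and_congr_right fun _ => (hc2 _)) rfl rfl]
  rw [hp2, pvJoin_split]
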